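-- pv_equiv track=rewrite | github.com/clevercanary/hca-validation-tools | packages/hca-anndata-tools/src/hca_anndata_tools/marker_genes.py | _extract_marker_genes_from_categories
-- ===== SOURCE A (Python) =====
-- _SKIP_VALUES = {"unknown", "", "NA", "na", "none", "None"}
--
-- def _extract_marker_genes_from_categories(categories: set[str]) -> set[str]:
--     """Parse unique gene symbols from a set of category values.
--
--     Values are comma-separated gene symbols like "MARCO,CST3,FABP4,INHBA".
--     Skips null, empty, and placeholder values.
--     """
--     genes: set[str] = set()
--     for val in categories:
--         val = str(val).strip()
--         if val in _SKIP_VALUES: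
--             continue
--         for gene in val.split(","):
--             gene = gene.strip()
--             if gene and gene not in _SKIP_VALUES:
--                 genes.add(gene)
--     return genes
-- ===== SOURCE B (Python) =====
-- _SKIP_VALUES = {"unknown", "", "NA", "na", "none", "None"}
--
-- def _extract_marker_genes_from_categories(categories):
--     """Concatenate-first decomposition: join the stripped values with commas,
--     then split once and filter tokens in a single flat pass."""
--     joined = ",".join(str(v).strip() for v in categories)
--     genes = set()
--     for token in joined.split(","):
--         gene = token.strip()
--         if gene and gene not in _SKIP_VALUES:
--             genes.add(gene)
--     return genes
-- ===== Notes on version B (the rewrite author's own statement) =====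
-- stated objective: alternative
-- what changed: Replaces A's nested per-value split loop (with a whole-value skip guard) by a concatenate-first decomposition: join all stripped values with commas, split the joined string once, and filter tokens in a single flat pass; the whole-value skip guard disappears because skip values are single comma-free tokens caught by the token filter.
import Mathlib
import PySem

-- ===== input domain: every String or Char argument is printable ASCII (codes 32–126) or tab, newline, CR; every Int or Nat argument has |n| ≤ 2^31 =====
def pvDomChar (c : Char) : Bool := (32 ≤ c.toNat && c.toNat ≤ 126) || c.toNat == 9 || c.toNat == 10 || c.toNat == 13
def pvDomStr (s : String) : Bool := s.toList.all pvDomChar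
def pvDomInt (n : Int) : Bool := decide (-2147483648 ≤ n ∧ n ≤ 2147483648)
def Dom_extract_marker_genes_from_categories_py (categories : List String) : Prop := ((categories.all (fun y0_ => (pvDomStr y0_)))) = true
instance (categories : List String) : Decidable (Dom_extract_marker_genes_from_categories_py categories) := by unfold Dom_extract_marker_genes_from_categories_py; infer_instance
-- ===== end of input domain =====

-- B replaces A's nested per-value split loop by a concatenate-first decomposition (join all
-- stripped values with commas, split once, filter tokens in a single flat pass); objective: alternative.

-- the module constant _SKIP_VALUES (shared by both Pythons)
def pvSkip : List String := ["unknown", "", "NA", "na", "none", "None"]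

-- the per-token body 'gene = g.strip(); if gene and gene not in _SKIP_VALUES: genes.add(gene)',
-- textually identical in A's inner loop and in B's flat loop
def pvStep (genes : List String) (g : String) : List String :=
  let gene := PySem.Str.strip g
  if gene ≠ "" ∧ gene ∉ pvSkip then PySem.Set.add genes gene else genes

-- ===== PORT A =====
def extract_marker_genes_from_categories_py (categories : List String) : List String :=
  categories.foldl
    (fun genes val0 =>
      let val := PySem.Str.strip val0
      if val ∈ pvSkip then genes
      else ((PySem.Str.split? val ",").getD []).foldl pvStep genes)
    []

-- ===== PORT B =====
def extract_marker_genes_from_categories_py_alt (categories : List String) : List String :=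
  let joined := PySem.Str.join "," (categories.map (fun v => PySem.Str.strip v))
  ((PySem.Str.split? joined ",").getD []).foldl pvStep []

-- ===== PRECONDITION & SPEC =====
def Spec_extract_marker_genes_from_categories_py (categories : List String) (out : List String) : Prop := out = extract_marker_genes_from_categories_py_alt categories
instance (categories : List String) (out : List String) : Decidable (Spec_extract_marker_genes_from_categories_py categories out) := by unfold Spec_extract_marker_genes_from_categories_py; infer_instance

-- ===== CLAIM (what is proved, stated in full; the proofs are below) =====
def Claim_equal_extract_marker_genes_from_categories_py : Prop := ∀ (categories : List String), Dom_extract_marker_genes_from_categories_py categories → Spec_extract_marker_genes_from_categories_py categories (extract_marker_genes_from_categories_py categories)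

-- ===== LEMMAS AND PROOFS =====

-- reference splitter for a single-character separator ','
def pvSpl : List Char → List (List Char)
  | [] => [[]]
  | c :: rest => if c = ',' then [] :: pvSpl rest else (pvSpl rest).modifyHead (c :: ·)

theorem pvSpl_ne_nil (l : List Char) : pvSpl l ≠ [] := by
  induction l with
  | nil => simp [pvSpl]
  | cons c rest ih =>
    simp only [pvSpl]
    split
    · simp
    · cases h : pvSpl rest with
      | nil => exact absurd h ih
      | cons a t => simp

theorem pvGo_eq (fuel : ℕ) : ∀ (l cur : List Char) (acc : List (List Char)), l.length ≤ fuel →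
    PySem.Chars.splitOn.go [','] fuel l cur acc
      = acc.reverse ++ (pvSpl l).modifyHead (cur.reverse ++ ·) := by
  induction fuel with
  | zero =>
    intro l cur acc h
    have hl : l = [] := by cases l with
      | nil => rfl
      | cons a t => simp at h
    subst hl
    rw [PySem.Chars.splitOn.go.eq_def]
    simp [pvSpl]
  | succ n ih =>
    intro l cur acc h
    cases l with
    | nil =>
      rw [PySem.Chars.splitOn.go.eq_def]
      simp [pvSpl]
    | cons c rest =>
      rw [PySem.Chars.splitOn.go.eq_def]
      simp only [List.isPrefixOf, List.length_cons] at *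
      by_cases hc : c = ','
      · subst hc
        simp only [BEq.rfl, Bool.true_and, List.isPrefixOf_nil_left, if_pos, List.length_cons,
          List.drop_succ_cons, List.length_nil, List.drop_zero]
        rw [ih rest [] (cur.reverse :: acc) (by omega)]
        simp only [pvSpl, if_pos rfl, List.reverse_nil, List.reverse_cons, List.nil_append,
          List.modifyHead_cons, List.append_assoc, List.singleton_append]
        cases hr : pvSpl rest with
        | nil => exact absurd hr (pvSpl_ne_nil rest)
        | cons x xs => simp
      · rw [if_neg (by simp; exact fun hcc => hc hcc.symm)]
        rw [ih rest (c :: cur) acc (by omega)]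
        simp only [pvSpl, if_neg hc]
        congr 1
        cases hr : pvSpl rest with
        | nil => exact absurd hr (pvSpl_ne_nil rest)
        | cons a t => simp

theorem pvSplitOn_eq (s : List Char) : PySem.Chars.splitOn s [','] = pvSpl s := by
  unfold PySem.Chars.splitOn
  rw [pvGo_eq (s.length + 1) s [] [] (by omega)]
  cases h : pvSpl s with
  | nil => exact absurd h (pvSpl_ne_nil s)
  | cons a t => simp

-- the token list A computes for one value / B computes per joined segment
def pvTokens (s : String) : List String := (pvSpl s.toList).map String.ofList

theorem pvSplit_eq (s : String) : (PySem.Str.split? s ",").getD [] = pvTokens s := by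
  simp [PySem.Str.split?, PySem.Chars.split?, pvTokens]
  rw [pvSplitOn_eq]

theorem pvSpl_append (a b : List Char) : pvSpl (a ++ ',' :: b) = pvSpl a ++ pvSpl b := by
  induction a with
  | nil => simp [pvSpl]
  | cons c t ih =>
    simp only [List.cons_append, pvSpl, ih]
    split
    · simp
    · cases h : pvSpl t with
      | nil => exact absurd h (pvSpl_ne_nil t)
      | cons x xs => simp

theorem pvSpl_no_comma (l : List Char) (h : ',' ∉ l) : pvSpl l = [l] := by
  induction l with
  | nil => rfl
  | cons c t ih =>
    simp only [List.mem_cons, not_or] at h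
    simp [pvSpl, Ne.symm h.1, ih h.2]

theorem pvSkip_no_comma : ∀ s ∈ pvSkip, ',' ∉ s.toList := by decide

theorem pvStrip_skip : ∀ s ∈ pvSkip, PySem.Str.strip s ∈ pvSkip := by decide

-- folding the tokens of a skipped value changes nothing
theorem pvSkip_fold (s : String) (hs : s ∈ pvSkip) (acc : List String) :
    (pvTokens s).foldl pvStep acc = acc := by
  unfold pvTokens
  rw [pvSpl_no_comma s.toList (pvSkip_no_comma s hs)]
  simp [String.ofList]
  simp only [pvStep]
  rw [if_neg]
  rintro ⟨-, hnot⟩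
  exact hnot (pvStrip_skip s hs)

theorem pvJoin_tokens (L : List String) (h : L ≠ []) :
    pvTokens (PySem.Str.join "," L) = L.flatMap pvTokens := by
  unfold pvTokens
  rw [show (PySem.Str.join "," L).toList
        = List.intercalate [','] (L.map String.toList) from by
      rw [PySem.Str.toList_join]; rfl]
  induction L with
  | nil => simp at h
  | cons a t ih =>
    cases t with
    | nil => simp [List.intercalate]
    | cons b u =>
      have : List.intercalate [','] ((a :: b :: u).map String.toList)
          = a.toList ++ ',' :: List.intercalate [','] ((b :: u).map String.toList) := by
        simp [List.intercalate]
      rw [this, pvSpl_append]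
      simp only [List.map_append, List.flatMap_cons]
      rw [ih (by simp)]
      rfl

theorem pvFold_flatMap (L : List String) (acc : List String) :
    (L.flatMap pvTokens).foldl pvStep acc
      = L.foldl (fun g v => (pvTokens v).foldl pvStep g) acc := by
  induction L generalizing acc with
  | nil => rfl
  | cons a t ih => simp only [List.flatMap_cons, List.foldl_append, List.foldl_cons, ih]

-- ===== VERDICT (by name: the statement is the Claim_ definition above) =====
theorem extract_marker_genes_from_categories_py_spec : Claim_equal_extract_marker_genes_from_categories_py := by
  intro categories _
  unfold Spec_extract_marker_genes_from_categories_py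
  simp only [extract_marker_genes_from_categories_py, extract_marker_genes_from_categories_py_alt]
  cases categories with
  | nil => decide
  | cons c cs =>
    rw [pvSplit_eq, pvJoin_tokens _ (by simp), pvFold_flatMap]
    simp only [List.foldl_map]
    congr 1
    funext g v
    by_cases hmem : PySem.Str.strip v ∈ pvSkip
    · rw [if_pos hmem, pvSkip_fold _ hmem]
    · rw [if_neg hmem, pvSplit_eq]
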